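-- pv_equiv track=rewrite | github.com/golfyangkee/daily_quiz | 프로그래머스/0/181887. 홀수 vs 짝수/홀수 vs 짝수.py | solution
-- ===== SOURCE A (Python) =====
-- def solution(num_list):
--     odd_hap = 0
--     even_hap = 0
--     for i in range(len(num_list)):
--         if i%2==0:
--             odd_hap += num_list[i]
--         else:
--             even_hap += num_list[i]
--     return max(odd_hap, even_hap)
-- ===== SOURCE B (Python) =====
-- def solution(num_list):
--     # Two staged passes via stride slicing: no index loop, no parity test.
--     return max(sum(num_list[::2]), sum(num_list[1::2]))
-- ===== Notes on version B (the rewrite author's own statement) =====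
-- stated objective: idiomatic
-- what changed: Replaces A's indexed loop with a per-element i%2 parity branch by two staged passes: stride slices num_list[::2] and num_list[1::2] partition the list up front and each slice is summed with the builtin sum, then max is taken.
import Mathlib
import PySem

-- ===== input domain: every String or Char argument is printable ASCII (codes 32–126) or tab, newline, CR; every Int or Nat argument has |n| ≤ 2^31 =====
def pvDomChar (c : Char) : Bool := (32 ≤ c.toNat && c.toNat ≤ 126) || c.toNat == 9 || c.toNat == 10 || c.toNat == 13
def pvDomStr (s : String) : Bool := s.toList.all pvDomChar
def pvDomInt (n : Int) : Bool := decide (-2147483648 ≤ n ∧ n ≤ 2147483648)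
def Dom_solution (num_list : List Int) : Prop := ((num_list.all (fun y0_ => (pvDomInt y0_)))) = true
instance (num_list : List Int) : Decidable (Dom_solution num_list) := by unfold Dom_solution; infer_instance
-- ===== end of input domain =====

-- B replaces A's indexed loop with per-element i%2 branches by two staged passes over the stride slices [::2] and [1::2], each summed separately (same cost, more idiomatic).

-- ===== PORT A =====
-- indexed loop: for i in range(len(num_list)): add num_list[i] to odd_hap if i%2==0 else even_hap
def solution (num_list : List Int) : Int :=
  let r := (PySem.List.pyRange 0 (num_list.length : Int) 1).foldl
    (fun (s : Int × Int) i =>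
      if PySem.Int.mod i 2 = 0 then (s.1 + PySem.List.pyGetD num_list i 0, s.2)
      else (s.1, s.2 + PySem.List.pyGetD num_list i 0)) (0, 0)
  max r.1 r.2

-- ===== PORT B =====
-- max(sum(num_list[::2]), sum(num_list[1::2]))
def solution_alt (num_list : List Int) : Int :=
  max (((PySem.List.slice? num_list none none 2).getD []).foldl (· + ·) 0)
      (((PySem.List.slice? num_list (some 1) none 2).getD []).foldl (· + ·) 0)

-- ===== PRECONDITION & SPEC =====
def Spec_solution (num_list : List Int) (out : Int) : Prop := out = solution_alt num_list
instance (num_list : List Int) (out : Int) : Decidable (Spec_solution num_list out) := by unfold Spec_solution; infer_instance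

-- ===== CLAIM (what is proved, stated in full; the proofs are below) =====
def Claim_equal_solution : Prop := ∀ (num_list : List Int), Dom_solution num_list → Spec_solution num_list (solution num_list)

-- ===== LEMMAS AND PROOFS =====

-- elements at even indices
def pvEvens : List Int → List Int
  | [] => []
  | [x] => [x]
  | x :: _ :: t => x :: pvEvens t

def pvSum (l : List Int) : Int := l.foldl (· + ·) 0

lemma pvSum_append (l : List Int) (y : Int) : pvSum (l ++ [y]) = pvSum l + y := by
  simp [pvSum, List.foldl_append]

lemma pvEvens_append (xs : List Int) (y : Int) :
    pvEvens (xs ++ [y]) = if xs.length % 2 = 0 then pvEvens xs ++ [y] else pvEvens xs := by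
  induction xs using pvEvens.induct with
  | case1 => simp [pvEvens]
  | case2 x => simp [pvEvens]
  | case3 x z t ih =>
    simp only [List.cons_append, pvEvens, List.length_cons, ih]
    have : (t.length + 1 + 1) % 2 = t.length % 2 := by omega
    rw [this]
    split_ifs <;> simp

-- the elements of xs at indices 0,2,4,… listed by k
lemma filterMap_range_evens (xs : List Int) :
    List.filterMap (fun k : ℕ => xs[2*k]?) (List.range ((xs.length+1)/2)) = pvEvens xs := by
  induction xs using pvEvens.induct with
  | case1 => simp [pvEvens]
  | case2 x => simp [pvEvens]
  | case3 x z t ih =>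
    have hc : ((x :: z :: t).length + 1)/2 = (t.length+1)/2 + 1 := by simp; omega
    rw [hc, List.range_succ_eq_map, List.filterMap_cons]
    simp only [Nat.mul_zero, List.getElem?_cons_zero, List.filterMap_map]
    have hf : ∀ k : ℕ, ((x :: z :: t)[2*(k+1)]? ) = t[2*k]? := by
      intro k
      have h : 2*(k+1) = (2*k)+1+1 := by omega
      rw [h]; simp
    simp only [Function.comp_def, Nat.succ_eq_add_one, hf, ih, pvEvens]

-- L1: the slice num_list[::2] is pvEvens
lemma slice2_eq_pvEvens (xs : List Int) :
    PySem.List.slice? xs none none 2 = some (pvEvens xs) := by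
  rw [← filterMap_range_evens]
  simp only [PySem.List.slice?, PySem.List.sliceIndices]
  norm_num
  have hcount : (if 0 < xs.length then (((xs.length:ℤ) + 2 - 1) / 2).toNat else 0)
      = (xs.length + 1) / 2 := by
    split_ifs with h <;> omega
  rw [hcount]
  apply List.filterMap_congr
  intro k _
  congr 1

-- L2: the slice num_list[1::2] is pvEvens of the tail
lemma slice2_tail_eq (xs : List Int) :
    PySem.List.slice? xs (some 1) none 2 = some (pvEvens xs.tail) := by
  cases xs with
  | nil => simp [PySem.List.slice?, PySem.List.sliceIndices, pvEvens]
  | cons x t =>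
    rw [show (x :: t).tail = t from rfl, ← filterMap_range_evens]
    simp only [PySem.List.slice?, PySem.List.sliceIndices]
    norm_num
    have hcount : (if 0 < t.length then (((t.length:ℤ) + 2 - 1) / 2).toNat else 0)
        = (t.length + 1) / 2 := by
      split_ifs with h <;> omega
    rw [hcount]
    apply List.filterMap_congr
    intro k _
    have h : (1 + 2*(k:ℤ)).toNat = 2*k + 1 := by omega
    rw [h]
    simp

-- A's loop state, as a function of the list
def pvAfold (xs : List Int) : Int × Int :=
  (PySem.List.pyRange 0 (xs.length : Int) 1).foldl
    (fun (s : Int × Int) i =>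
      if PySem.Int.mod i 2 = 0 then (s.1 + PySem.List.pyGetD xs i 0, s.2)
      else (s.1, s.2 + PySem.List.pyGetD xs i 0)) (0, 0)

lemma pvAfold_eq (xs : List Int) :
    pvAfold xs = (pvSum (pvEvens xs), pvSum (pvEvens xs.tail)) := by
  induction xs using List.reverseRecOn with
  | nil => simp [pvAfold, pvEvens, pvSum, PySem.List.pyRange_one_eq_nil]
  | append_singleton xs y ih =>
    have hlen : ((xs ++ [y]).length : Int) = (xs.length : Int) + 1 := by simp
    have hsplit : PySem.List.pyRange 0 ((xs ++ [y]).length : Int) 1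
        = PySem.List.pyRange 0 (xs.length : Int) 1 ++ [(xs.length : Int)] := by
      rw [hlen, PySem.List.pyRange_one_succ_right (by positivity)]
    have hcongr : (PySem.List.pyRange 0 (xs.length : Int) 1).foldl
        (fun (s : Int × Int) i =>
          if PySem.Int.mod i 2 = 0 then (s.1 + PySem.List.pyGetD (xs ++ [y]) i 0, s.2)
          else (s.1, s.2 + PySem.List.pyGetD (xs ++ [y]) i 0)) (0, 0) = pvAfold xs := by
      unfold pvAfold
      apply PySem.List.foldl_congr_mem
      intro a i hi
      rcases (PySem.List.mem_pyRange_one).1 hi with ⟨h0, h1⟩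
      have hget : PySem.List.pyGetD (xs ++ [y]) i 0 = PySem.List.pyGetD xs i 0 := by
        rw [PySem.List.pyGetD_eq_getElem (xs ++ [y]) 0 h0 (by simp; omega),
            PySem.List.pyGetD_eq_getElem xs 0 h0 (by exact_mod_cast h1),
            List.getElem_append_left (by omega)]
      rw [hget]
    have hlast : PySem.List.pyGetD (xs ++ [y]) (xs.length : Int) 0 = y := by
      rw [PySem.List.pyGetD_eq_getElem (xs ++ [y]) 0 (by positivity) (by simp)]
      simp
    have hmod : PySem.Int.mod (xs.length : Int) 2 = ((xs.length % 2 : Nat) : Int) := by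
      exact_mod_cast PySem.Int.mod_natCast xs.length 2
    have htail : (xs ++ [y]).tail = if xs = [] then ([] : List Int) else xs.tail ++ [y] := by
      cases xs <;> simp
    unfold pvAfold
    rw [hsplit, List.foldl_append]
    simp only [List.foldl_cons, List.foldl_nil]
    rw [hcongr, hlast, ih, hmod, pvEvens_append, htail]
    rcases Nat.even_or_odd xs.length with he | ho
    · have h0 : xs.length % 2 = 0 := Nat.even_iff.1 he
      have hx : xs = [] ∨ xs ≠ [] := em _
      rcases hx with rfl | hne
      · simp [pvEvens, pvSum]
      · have htl : xs.tail.length % 2 = 1 := by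
          have : xs.length ≠ 0 := by simpa [List.length_eq_zero_iff] using hne
          have : xs.tail.length = xs.length - 1 := by simp
          omega
        have hl1 : (xs.length - 1) % 2 = 1 := by
          have := List.length_pos_iff.2 hne; omega
        simp [h0, hne, pvEvens_append, hl1, pvSum_append]
    · have h1 : xs.length % 2 = 1 := Nat.odd_iff.1 ho
      have hne : xs ≠ [] := by
        intro h; subst h; simp at h1
      have htl : xs.tail.length % 2 = 0 := by
        have : xs.tail.length = xs.length - 1 := by simp
        omega
      have hl0 : (xs.length - 1) % 2 = 0 := by omega
      simp [h1, hne, pvEvens_append, hl0, pvSum_append]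

-- ===== VERDICT (by name: the statement is the Claim_ definition above) =====
theorem solution_spec : Claim_equal_solution := by
  intro xs _
  show solution xs = solution_alt xs
  simp only [solution, solution_alt]
  show max (pvAfold xs).1 (pvAfold xs).2 = _
  rw [pvAfold_eq, slice2_eq_pvEvens, slice2_tail_eq]
  rfl
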